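-- pv_equiv track=rewrite | github.com/landjbs/instadeep-internship | questionAnswering/squadAnalysis.py | make_target_list
-- ===== SOURCE A (Python) =====
-- def make_target_list(answerTokens, paragraphTokens, questionLen, paraLen):
--     """
--     Makes a list of targets for training where answer tokens have score of
--     1 and everything else (including the question tokens) have score of 0
--     """
--     answerLen = len(answerTokens)
--     firstAnswerWord = answerTokens[0]
--     for i, word in enumerate(paragraphTokens):
--         if (word == firstAnswerWord):
--             if all((word in answerTokens) for word
--                     in paragraphTokens[i : (i + answerLen)]):
--                 answerStart, answerEnd = i, (i + answerLen)
--     paragraphTargets = [1 if i in range(answerStart, answerEnd) else 0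
--                         for i in range(paraLen)]
--     return ([0 for _ in range(questionLen)] + paragraphTargets)
-- ===== SOURCE B (Python) =====
-- def make_target_list(answerTokens, paragraphTokens, questionLen, paraLen):
--     """Same targets as A, but the quadratic all()-window scan is replaced by an
--     answer-token set plus a prefix-sum table, making each window test O(1)."""
--     answerLen = len(answerTokens)
--     firstAnswerWord = answerTokens[0]
--     answerSet = set(answerTokens)
--     prefix = [0]
--     for tok in paragraphTokens:
--         prefix.append(prefix[-1] + (1 if tok in answerSet else 0))
--     n = len(paragraphTokens)
--     for i, word in enumerate(paragraphTokens):
--         if word == firstAnswerWord: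
--             end = min(i + answerLen, n)
--             if prefix[end] - prefix[i] == end - i:
--                 answerStart, answerEnd = i, i + answerLen
--     return [0] * questionLen + [1 if answerStart <= i < answerEnd else 0
--                                 for i in range(paraLen)]
-- ===== Notes on version B (the rewrite author's own statement) =====
-- stated objective: faster
-- what changed: B replaces the nested all()-membership scan over each candidate window with a set of answer tokens and a prefix-sum table of memberships, so every window test is O(1); the last-match-wins scan and output construction are unchanged.
import Mathlib
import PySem

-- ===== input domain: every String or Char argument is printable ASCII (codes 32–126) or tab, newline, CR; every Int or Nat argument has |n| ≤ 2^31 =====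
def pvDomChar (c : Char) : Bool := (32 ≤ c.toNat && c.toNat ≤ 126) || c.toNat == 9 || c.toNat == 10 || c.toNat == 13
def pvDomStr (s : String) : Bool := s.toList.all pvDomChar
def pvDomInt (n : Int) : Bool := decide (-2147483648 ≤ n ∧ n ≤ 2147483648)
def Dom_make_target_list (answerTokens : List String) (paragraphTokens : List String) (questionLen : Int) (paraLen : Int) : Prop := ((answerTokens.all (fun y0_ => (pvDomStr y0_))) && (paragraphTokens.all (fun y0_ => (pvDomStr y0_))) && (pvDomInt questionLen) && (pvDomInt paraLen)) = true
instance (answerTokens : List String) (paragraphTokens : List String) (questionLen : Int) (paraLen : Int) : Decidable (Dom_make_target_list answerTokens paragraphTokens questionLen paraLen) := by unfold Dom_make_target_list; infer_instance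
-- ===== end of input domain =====

-- B replaces A's nested all()-membership window scan by an answer-token set plus a
-- prefix-sum table of memberships (one O(1) test per candidate window); return values proved equal.

-- ===== PORT A =====
def make_target_list (answerTokens : List String) (paragraphTokens : List String) (questionLen : Int) (paraLen : Int) : List Int :=
  let answerLen : Int := answerTokens.length
  match PySem.List.pyGet? answerTokens 0 with
  | none => []   -- answerTokens = []: Python raises IndexError here (excluded by Pre_)
  | some firstAnswerWord =>
    match (PySem.List.enumerate paragraphTokens 0).foldl (fun st iw =>
        if iw.2 = firstAnswerWord then
          if (PySem.List.slice paragraphTokens (some iw.1) (some (iw.1 + answerLen))).all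
               (fun w => answerTokens.contains w) then
            some (iw.1, iw.1 + answerLen)
          else st
        else st) none with
    | none =>
      -- answerStart never bound: read only if range(paraLen) is non-empty, else Python
      -- returns the zeros prefix; with 0 < paraLen Python raises UnboundLocalError (excluded by Pre_)
      if 0 < paraLen then [] else (PySem.List.pyRange 0 questionLen 1).map (fun _ => (0 : Int))
    | some se =>
      -- 'i in range(a, b)' with step 1 is exactly a ≤ i < b
      (PySem.List.pyRange 0 questionLen 1).map (fun _ => (0 : Int)) ++
      (PySem.List.pyRange 0 paraLen 1).map (fun i =>
        if se.1 ≤ i ∧ i < se.2 then (1 : Int) else 0)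

-- ===== PORT B =====
def make_target_list_alt (answerTokens : List String) (paragraphTokens : List String) (questionLen : Int) (paraLen : Int) : List Int :=
  let answerLen : Int := answerTokens.length
  match PySem.List.pyGet? answerTokens 0 with
  | none => []   -- answerTokens = []: B's Python raises IndexError here too (excluded by Pre_)
  | some firstAnswerWord =>
    let answerSet : PySem.Set String := PySem.Set.ofList answerTokens
    let pfx : List Int := paragraphTokens.foldl (fun acc tok =>
        acc ++ [PySem.List.pyGetD acc (-1) 0 +
                (if PySem.Set.contains answerSet tok then 1 else 0)]) [0]
    let n : Int := paragraphTokens.length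
    match (PySem.List.enumerate paragraphTokens 0).foldl (fun st iw =>
        if iw.2 = firstAnswerWord then
          if PySem.List.pyGetD pfx (min (iw.1 + answerLen) n) 0 - PySem.List.pyGetD pfx iw.1 0
               = min (iw.1 + answerLen) n - iw.1 then
            some (iw.1, iw.1 + answerLen)
          else st
        else st) none with
    | none =>
      -- answerStart read only if range(paraLen) is non-empty; else B returns the zeros prefix
      if 0 < paraLen then [] else List.replicate questionLen.toNat 0
    | some se =>
      List.replicate questionLen.toNat 0 ++
      (PySem.List.pyRange 0 paraLen 1).map (fun i =>
        if se.1 ≤ i ∧ i < se.2 then (1 : Int) else 0)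

-- ===== PRECONDITION & SPEC =====
-- Pre_ excludes exactly the inputs where Python A raises: answerTokens = [] (IndexError on
-- answerTokens[0]) and, when 0 < paraLen forces answerStart to be read, inputs with no
-- matching window (answerStart stays unbound: UnboundLocalError).
def Pre_make_target_list (answerTokens : List String) (paragraphTokens : List String) (questionLen : Int) (paraLen : Int) : Prop :=
  answerTokens ≠ [] ∧
  (paraLen ≤ 0 ∨
  (List.range paragraphTokens.length).any (fun k =>
    (paragraphTokens.getD k "" == answerTokens.headD "") &&
    ((paragraphTokens.drop k).take answerTokens.length).all
      (fun w => answerTokens.contains w)) = true)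
instance (answerTokens : List String) (paragraphTokens : List String) (questionLen : Int) (paraLen : Int) : Decidable (Pre_make_target_list answerTokens paragraphTokens questionLen paraLen) := by unfold Pre_make_target_list; infer_instance

def pvWitness_make_target_list : List String × List String × Int × Int :=
  (["b", "c"], ["a", "b", "c", "d"], 2, 4)

def Spec_make_target_list (answerTokens : List String) (paragraphTokens : List String) (questionLen : Int) (paraLen : Int) (out : List Int) : Prop := out = make_target_list_alt answerTokens paragraphTokens questionLen paraLen
instance (answerTokens : List String) (paragraphTokens : List String) (questionLen : Int) (paraLen : Int) (out : List Int) : Decidable (Spec_make_target_list answerTokens paragraphTokens questionLen paraLen out) := by unfold Spec_make_target_list; infer_instance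

-- ===== CLAIM (what is proved, stated in full; the proofs are below) =====
def Claim_equal_make_target_list : Prop := ∀ (answerTokens : List String) (paragraphTokens : List String) (questionLen : Int) (paraLen : Int), Dom_make_target_list answerTokens paragraphTokens questionLen paraLen → Pre_make_target_list answerTokens paragraphTokens questionLen paraLen → Spec_make_target_list answerTokens paragraphTokens questionLen paraLen (make_target_list answerTokens paragraphTokens questionLen paraLen)

-- ===== LEMMAS AND PROOFS =====

-- membership in the deduplicated answer set coincides with list membership
theorem set_contains_eq (l : List String) (x : String) :
    PySem.Set.contains (PySem.Set.ofList l) x = l.contains x := by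
  rcases h : l.contains x
  · simp_all [List.contains_eq_mem, PySem.Set.mem_ofList]
  · simp_all [List.contains_eq_mem, PySem.Set.mem_ofList]

-- B's prefix table: entry j is the number of members among the first j paragraph tokens
theorem pfx_spec (p : String → Bool) (xs : List String) :
    xs.foldl (fun acc tok => acc ++ [PySem.List.pyGetD acc (-1) 0 + (if p tok then 1 else 0)]) [0]
      = (List.range (xs.length + 1)).map (fun j => (((xs.take j).countP p : Nat) : Int)) := by
  induction xs using List.reverseRecOn with
  | nil => rfl
  | append_singleton ys x ih =>
    rw [List.foldl_append, ih]
    simp only [List.foldl_cons, List.foldl_nil]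
    have hget : PySem.List.pyGetD ((List.range (ys.length + 1)).map
        (fun j => (((ys.take j).countP p : Nat) : Int))) (-1) 0
        = ((ys.countP p : Nat) : Int) := by
      rw [List.range_succ, List.map_append]
      simp only [List.map_cons, List.map_nil]
      rw [PySem.List.pyGetD_neg_one_append_singleton]
      rw [List.take_length]
    rw [hget]
    have hlen : (ys ++ [x]).length + 1 = (ys.length + 1) + 1 := by simp
    rw [hlen, List.range_succ (n := ys.length + 1), List.map_append]
    congr 1
    · apply List.map_congr_left
      intro j hj
      rw [List.mem_range] at hj
      rw [List.take_append_of_le_length (by omega)]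
    · simp only [List.map_cons, List.map_nil]
      congr 1
      rw [List.take_of_length_le (by simp)]
      rcases h : p x <;> simp [List.countP_append, h]

theorem getD_map_range' (f : Nat → Int) (n k : Nat) (d : Int) :
    ((List.range n).map f).getD k d = if k < n then f k else d := by
  rcases Nat.lt_or_ge k n with h | h
  · rw [List.getD_eq_getElem _ _ (by simpa using h)]
    simp [h]
  · rw [List.getD_eq_default _ _ (by simpa using h)]
    simp [Nat.not_lt.2 h]

-- the prefix-sum window test equals A's all()-membership window test
theorem window_iff (ats pts : List String) (k : Nat) (hk : k < pts.length) :
    (PySem.List.pyGetD ((List.range (pts.length + 1)).map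
        (fun j => (((pts.take j).countP (fun w => ats.contains w) : Nat) : Int)))
        (min ((k:Int) + (ats.length:Int)) (pts.length:Int)) 0
      - PySem.List.pyGetD ((List.range (pts.length + 1)).map
        (fun j => (((pts.take j).countP (fun w => ats.contains w) : Nat) : Int)))
        (k:Int) 0
      = min ((k:Int) + (ats.length:Int)) (pts.length:Int) - (k:Int))
    ↔ (PySem.List.slice pts (some (k:Int)) (some ((k:Int) + (ats.length:Int)))).all
         (fun w => ats.contains w) = true := by
  set m := ats.length with hm
  set n := pts.length with hn
  set p : String → Bool := fun w => ats.contains w with hp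
  have hmin : min ((k:Int) + (m:Int)) (n:Int) = ((min (k + m) n : Nat) : Int) := by
    push_cast; rfl
  set e := min (k + m) n with he
  have hke : k ≤ e := by omega
  have hen : e ≤ n := by omega
  rw [hmin]
  rw [PySem.List.pyGetD_natCast, PySem.List.pyGetD_natCast]
  rw [getD_map_range' _ _ e, getD_map_range' _ _ k]
  rw [if_pos (by omega), if_pos (by omega)]
  have hsplit : pts.take e = pts.take k ++ (pts.drop k).take (e - k) := by
    rw [← List.take_add]
    congr 1
    omega
  have hslice : PySem.List.slice pts (some (k:Int)) (some ((k:Int) + (m:Int)))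
      = (pts.drop k).take (e - k) := by
    rw [PySem.List.slice_natCast_add]
    rw [List.take_eq_take_min, List.take_eq_take_min (i := e - k)]
    congr 1
    simp only [List.length_drop, ← hn]
    omega
  rw [hslice, hsplit, List.countP_append]
  have hlen : ((pts.drop k).take (e - k)).length = e - k := by
    simp only [List.length_take, List.length_drop, ← hn]
    omega
  constructor
  · intro h
    have hcount : ((pts.drop k).take (e - k)).countP p = e - k := by omega
    rw [List.all_eq_true]
    intro a ha
    exact List.countP_eq_length.mp (by rw [hcount, hlen]) a ha
  · intro h
    have : ((pts.drop k).take (e - k)).countP p = e - k := by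
      rw [List.countP_eq_length.mpr (List.all_eq_true.mp h), hlen]
    omega

-- A's scan and B's scan are the same fold: the step functions agree on every enumerated token
theorem fold_eq (answerTokens : List String) (paragraphTokens : List String) (first : String) :
    (PySem.List.enumerate paragraphTokens 0).foldl (fun st iw =>
        if iw.2 = first then
          if (PySem.List.slice paragraphTokens (some iw.1) (some (iw.1 + (answerTokens.length : Int)))).all
               (fun w => answerTokens.contains w) then
            some (iw.1, iw.1 + (answerTokens.length : Int))
          else st
        else st) (none : Option (Int × Int))
    = (PySem.List.enumerate paragraphTokens 0).foldl (fun st iw =>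
        if iw.2 = first then
          if PySem.List.pyGetD (paragraphTokens.foldl (fun acc tok =>
                acc ++ [PySem.List.pyGetD acc (-1) 0 +
                        (if PySem.Set.contains (PySem.Set.ofList answerTokens) tok then 1 else 0)]) [0])
                (min (iw.1 + (answerTokens.length : Int)) (paragraphTokens.length : Int)) 0
              - PySem.List.pyGetD (paragraphTokens.foldl (fun acc tok =>
                acc ++ [PySem.List.pyGetD acc (-1) 0 +
                        (if PySem.Set.contains (PySem.Set.ofList answerTokens) tok then 1 else 0)]) [0])
                iw.1 0
              = min (iw.1 + (answerTokens.length : Int)) (paragraphTokens.length : Int) - iw.1 then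
            some (iw.1, iw.1 + (answerTokens.length : Int))
          else st
        else st) none := by
  apply PySem.List.foldl_congr_mem
  intro acc iw hiw
  rw [PySem.List.mem_enumerate_iff] at hiw
  obtain ⟨k, hklt, rfl⟩ := hiw
  simp only [zero_add, set_contains_eq, pfx_spec]
  by_cases h1 : paragraphTokens[k] = first
  · rw [if_pos h1, if_pos h1]
    by_cases h2 : (PySem.List.slice paragraphTokens (some (k:Int))
        (some ((k:Int) + (answerTokens.length:Int)))).all (fun w => answerTokens.contains w) = true
    · rw [if_pos h2, if_pos ((window_iff answerTokens paragraphTokens k hklt).mpr h2)]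
    · rw [if_neg h2, if_neg (fun hc => h2 ((window_iff answerTokens paragraphTokens k hklt).mp hc))]
  · rw [if_neg h1, if_neg h1]

-- '[0 for _ in range(q)]' and '[0] * q' build the same list
theorem tail_zeros (q : Int) :
    (PySem.List.pyRange 0 q 1).map (fun _ => (0 : Int)) = List.replicate q.toNat 0 := by
  rw [PySem.List.pyRange_one, List.map_map]
  simp only [Function.comp_def, List.map_const']
  simp

-- ===== VERDICT (by name: the statement is the Claim_ definition above) =====
theorem make_target_list_spec : Claim_equal_make_target_list := by
  intro answerTokens paragraphTokens questionLen paraLen _ _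
  unfold Spec_make_target_list make_target_list make_target_list_alt
  cases h : PySem.List.pyGet? answerTokens 0 with
  | none => simp only [h]
  | some first =>
    simp only [h]
    rw [← fold_eq answerTokens paragraphTokens first]
    cases (PySem.List.enumerate paragraphTokens 0).foldl _ none with
    | none =>
      by_cases hp : 0 < paraLen
      · rw [if_pos hp, if_pos hp]
      · rw [if_neg hp, if_neg hp, tail_zeros]
    | some se => rw [tail_zeros]
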